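-- pv_equiv track=rewrite | github.com/Harry-Du1/Reinforcement-Learning-tool-for-RNA-folding | rl_essential/utils/structures.py | decompose_stems
-- ===== SOURCE A (Python) =====
-- from typing import List, Tuple
--
-- def decompose_stems(pairing: List[int]) -> List[Tuple[int,int,int]]:
--     """Return list of stems as (i_start, j_start, length) with contiguous stacks.
--     i_start pairs with j_start, and k-th layer is (i_start+k, j_start-k).
--     """
--     n = len(pairing)
--     stems = []
--     i = 0
--     seen = set()
--     while i < n:
--         j = pairing[i]
--         if j > i and (i, j) not in seen:
--             # start a new stem
--             k = 1
--             while i+k < j-k and pairing[i+k] == j-k: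
--                 seen.add((i+k, j-k))
--                 k += 1
--             stems.append((i, j, k))
--             i += k
--         else:
--             i += 1
--     return stems
-- ===== SOURCE B (Python) =====
-- from typing import List, Tuple
--
-- def decompose_stems(pairing: List[int]) -> List[Tuple[int, int, int]]:
--     """Single flat pass carrying the currently-open stem (i_start, j_start, length)."""
--     stems = []
--     open_stem = None
--     for i, j in enumerate(pairing):
--         if j > i:
--             if open_stem is not None:
--                 a, b, l = open_stem
--                 if j == b - l:
--                     open_stem = (a, b, l + 1)
--                     continue
--                 stems.append(open_stem)
--             open_stem = (i, j, 1)
--         else: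
--             if open_stem is not None:
--                 stems.append(open_stem)
--                 open_stem = None
--     if open_stem is not None:
--         stems.append(open_stem)
--     return stems
-- ===== Notes on version B (the rewrite author's own statement) =====
-- stated objective: simpler
-- what changed: Replaced A's nested while-loops (outer index loop with skip-by-k, inner stem-extension scan, and a seen set) by a single flat pass over enumerate(pairing) that carries the currently-open stem (i_start, j_start, length) as state, with no inner loop, no index arithmetic and no set.
import Mathlib
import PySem

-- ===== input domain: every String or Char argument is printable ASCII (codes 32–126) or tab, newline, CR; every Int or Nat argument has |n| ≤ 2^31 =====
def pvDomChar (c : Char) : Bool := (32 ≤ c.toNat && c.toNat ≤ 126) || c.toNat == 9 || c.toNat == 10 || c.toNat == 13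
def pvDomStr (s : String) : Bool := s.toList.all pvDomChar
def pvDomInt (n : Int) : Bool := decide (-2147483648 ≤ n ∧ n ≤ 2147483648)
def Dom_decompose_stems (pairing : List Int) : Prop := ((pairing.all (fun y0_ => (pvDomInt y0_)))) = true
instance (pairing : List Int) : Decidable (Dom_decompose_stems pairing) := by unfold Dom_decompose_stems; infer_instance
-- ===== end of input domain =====

-- B replaces A's nested while-loops (outer index with skip-by-k, inner stem scan, `seen` set)
-- by one flat pass carrying the currently-open stem as state (objective: simpler).

-- ===== PORT A =====
-- inner while loop `while i+k < j-k and pairing[i+k] == j-k: seen.add((i+k, j-k)); k += 1`,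
-- walking the suffix after position i structurally (pos = i+k, target = j-k);
-- returns (number of iterations = final k - 1, updated seen)
def dsInnerA (t : List Int) (pos target : Int) (seen : PySem.Set (Int × Int)) :
    Nat × PySem.Set (Int × Int) :=
  match t with
  | [] => (0, seen)
  | h :: tt =>
    if pos < target ∧ h = target then
      let r := dsInnerA tt (pos + 1) (target - 1) (PySem.Set.add seen (pos, target))
      (r.1 + 1, r.2)
    else (0, seen)

-- outer while loop over i: `rest` is the suffix pairing[i:], `i += k` = dropping k elements;
-- `¬ (i, j) ∈ seen` is Python's `(i, j) not in seen` (a PySem.Set IS its element list)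
def dsOuterA (rest : List Int) (i : Int) (seen : PySem.Set (Int × Int)) :
    List (Int × Int × Int) :=
  match rest with
  | [] => []
  | j :: t =>
    if j > i ∧ ¬ ((i, j) ∈ seen) then
      let r := dsInnerA t (i + 1) (j - 1) seen
      (i, j, ((1 + r.1 : Nat) : Int)) :: dsOuterA (t.drop r.1) (i + 1 + (r.1 : Int)) r.2
    else
      dsOuterA t (i + 1) seen
termination_by rest.length
decreasing_by
  · simp only [List.length_drop, List.length_cons]; omega
  · simp only [List.length_cons]; omega

def decompose_stems (pairing : List Int) : List (Int × Int × Int) :=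
  dsOuterA pairing 0 PySem.Set.empty

-- ===== PORT B =====
-- Source B's single for-loop over enumerate(pairing): state = (open stem, stems built so far)
def altGo (rest : List Int) (i : Int) (opn : Option (Int × Int × Int))
    (stems : List (Int × Int × Int)) : List (Int × Int × Int) :=
  match rest with
  | [] =>
    match opn with
    | some s => stems ++ [s]
    | none => stems
  | j :: t =>
    if j > i then
      match opn with
      | some (a, b, l) =>
        if j = b - l then altGo t (i + 1) (some (a, b, l + 1)) stems
        else altGo t (i + 1) (some (i, j, 1)) (stems ++ [(a, b, l)])
      | none => altGo t (i + 1) (some (i, j, 1)) stems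
    else
      match opn with
      | some s => altGo t (i + 1) none (stems ++ [s])
      | none => altGo t (i + 1) none stems

def decompose_stems_alt (pairing : List Int) : List (Int × Int × Int) :=
  altGo pairing 0 none []

-- ===== PRECONDITION & SPEC =====
-- pvCrash holds exactly on the inputs where A raises IndexError: some position i starts an
-- arithmetic run pairing[m] = pairing[i] - (m - i) that A's inner scan follows past the end
-- of the list; closed-form over the input only.
def pvCrash (p : List Int) : Prop :=
  ∃ i < p.length, (i : Int) < p.getD i 0 ∧ 2 * (p.length : Int) - (i : Int) < p.getD i 0 ∧
    ∀ m < p.length, i < m → p.getD m 0 = p.getD i 0 - ((m : Int) - (i : Int))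

-- Pre_ excludes exactly the inputs on which A raises IndexError (its inner scan reads past
-- the end of the array); it admits every input on which A returns.
def Pre_decompose_stems (pairing : List Int) : Prop := ¬ pvCrash pairing
instance (pairing : List Int) : Decidable (Pre_decompose_stems pairing) := by
  unfold Pre_decompose_stems pvCrash; infer_instance

def pvWitness_decompose_stems : List Int := [1, 0]

def Spec_decompose_stems (pairing : List Int) (out : List (Int × Int × Int)) : Prop :=
  out = decompose_stems_alt pairing
instance (pairing : List Int) (out : List (Int × Int × Int)) :
    Decidable (Spec_decompose_stems pairing out) := by unfold Spec_decompose_stems; infer_instance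

-- ===== CLAIM (what is proved, stated in full; the proofs are below) =====
def Claim_equal_decompose_stems : Prop :=
  ∀ (pairing : List Int), Dom_decompose_stems pairing → Pre_decompose_stems pairing →
    Spec_decompose_stems pairing (decompose_stems pairing)

-- ===== LEMMAS AND PROOFS =====

-- seen-free mirror of A's computation, the common shape both ports are reduced to
def dsInner (t : List Int) (pos target : Int) : Nat :=
  match t with
  | [] => 0
  | h :: tt => if pos < target ∧ h = target then dsInner tt (pos + 1) (target - 1) + 1 else 0

def dsN (rest : List Int) (i : Int) : List (Int × Int × Int) :=
  match rest with
  | [] => []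
  | j :: t =>
    if j > i then
      (i, j, ((1 + dsInner t (i + 1) (j - 1) : Nat) : Int)) ::
        dsN (t.drop (dsInner t (i + 1) (j - 1))) (i + 1 + (dsInner t (i + 1) (j - 1) : Int))
    else dsN t (i + 1)
termination_by rest.length
decreasing_by
  · simp only [List.length_drop, List.length_cons]; omega
  · simp only [List.length_cons]; omega

lemma dsInnerA_fst (t : List Int) : ∀ (pos target : Int) (seen : PySem.Set (Int × Int)),
    (dsInnerA t pos target seen).1 = dsInner t pos target := by
  induction t with
  | nil => intro pos target seen; simp [dsInnerA, dsInner]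
  | cons h tt ih =>
    intro pos target seen
    simp only [dsInnerA, dsInner]
    split_ifs with hc
    · simp [ih]
    · rfl

lemma dsInnerA_snd_mem (t : List Int) : ∀ (pos target : Int) (seen : PySem.Set (Int × Int))
    (p : Int × Int), p ∈ (dsInnerA t pos target seen).2 →
    p ∈ seen ∨ p.1 < pos + (dsInner t pos target : Int) := by
  induction t with
  | nil => intro pos target seen p hp; simp [dsInnerA] at hp; exact Or.inl hp
  | cons h tt ih =>
    intro pos target seen p hp
    simp only [dsInnerA, dsInner] at hp ⊢
    split_ifs at hp ⊢ with hc
    · rcases ih (pos + 1) (target - 1) (PySem.Set.add seen (pos, target)) p hp with hmem | hlt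
      · rcases (PySem.Set.mem_add _ _ _).1 hmem with hmem' | heq
        · exact Or.inl hmem'
        · right; subst heq; push_cast; omega
      · right; push_cast at hlt ⊢; omega
    · exact Or.inl hp

lemma dsOuterA_eq_dsN : ∀ (n : Nat) (rest : List Int) (i : Int) (seen : PySem.Set (Int × Int)),
    rest.length ≤ n → (∀ p ∈ seen, p.1 < i) → dsOuterA rest i seen = dsN rest i := by
  intro n
  induction n with
  | zero =>
    intro rest i seen hlen _
    have h : rest = [] := List.eq_nil_of_length_eq_zero (Nat.le_zero.1 hlen)
    subst h; simp [dsOuterA, dsN]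
  | succ n ih =>
    intro rest i seen hlen hinv
    match rest with
    | [] => simp [dsOuterA, dsN]
    | j :: t =>
      have hlen' : t.length ≤ n := by simp only [List.length_cons] at hlen; omega
      have hnotin : ¬ ((i, j) ∈ seen) := fun h => absurd (hinv _ h) (by simp)
      simp only [dsOuterA, dsN]
      by_cases hj : j > i
      · rw [if_pos ⟨hj, hnotin⟩, if_pos hj]
        have hfst := dsInnerA_fst t (i + 1) (j - 1) seen
        simp only [hfst]
        refine congrArg _ ?_
        apply ih
        · have hdl := List.length_drop (l := t) (i := dsInner t (i + 1) (j - 1))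
          omega
        · intro p hp
          rcases dsInnerA_snd_mem t (i + 1) (j - 1) seen p hp with hmem | hlt
          · have := hinv p hmem; omega
          · exact hlt
      · rw [if_neg (by tauto), if_neg hj]
        apply ih t (i + 1) seen hlen'
        intro p hp; have := hinv p hp; omega

lemma altGo_eq_dsN : ∀ (n : Nat) (rest : List Int), rest.length ≤ n →
    (∀ (i : Int) (acc : List (Int × Int × Int)), altGo rest i none acc = acc ++ dsN rest i) ∧
    (∀ (i a b l : Int) (acc : List (Int × Int × Int)),
      altGo rest i (some (a, b, l)) acc =
        acc ++ (a, b, l + (dsInner rest i (b - l) : Int)) ::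
          dsN (rest.drop (dsInner rest i (b - l))) (i + (dsInner rest i (b - l) : Int))) := by
  intro n
  induction n with
  | zero =>
    intro rest hlen
    have h : rest = [] := List.eq_nil_of_length_eq_zero (Nat.le_zero.1 hlen)
    subst h
    exact ⟨fun i acc => by simp [altGo, dsN],
           fun i a b l acc => by simp [altGo, dsN, dsInner]⟩
  | succ n ih =>
    intro rest hlen
    match rest with
    | [] =>
      exact ⟨fun i acc => by simp [altGo, dsN],
             fun i a b l acc => by simp [altGo, dsN, dsInner]⟩
    | j :: t =>
      have hlen' : t.length ≤ n := by simp only [List.length_cons] at hlen; omega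
      constructor
      · intro i acc
        simp only [altGo]
        by_cases hj : j > i
        · rw [if_pos hj, (ih t hlen').2 (i + 1) i j 1 acc]
          rw [show dsN (j :: t) i =
              (i, j, ((1 + dsInner t (i + 1) (j - 1) : Nat) : Int)) ::
                dsN (t.drop (dsInner t (i + 1) (j - 1)))
                  (i + 1 + (dsInner t (i + 1) (j - 1) : Int)) from by
            simp [dsN, hj]]
          simp
        · rw [if_neg hj, (ih t hlen').1 (i + 1) acc]
          rw [show dsN (j :: t) i = dsN t (i + 1) from by simp [dsN, hj]]
      · intro i a b l acc
        simp only [altGo]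
        by_cases hj : j > i
        · rw [if_pos hj]
          by_cases hc : j = b - l
          · rw [if_pos hc, (ih t hlen').2 (i + 1) a b (l + 1) acc]
            have hd : dsInner (j :: t) i (b - l) = dsInner t (i + 1) (b - l - 1) + 1 := by
              simp [dsInner, hc, show i < b - l by omega]
            have hbl : b - (l + 1) = b - l - 1 := by ring
            rw [hbl, hd, List.drop_succ_cons]
            push_cast
            ring_nf
          · rw [if_neg hc, (ih t hlen').2 (i + 1) i j 1 (acc ++ [(a, b, l)])]
            have hd : dsInner (j :: t) i (b - l) = 0 := by
              simp [dsInner]; intro _ h; exact absurd h hc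
            rw [hd]
            rw [show dsN ((j :: t).drop 0) (i + ((0 : Nat) : Int)) = dsN (j :: t) i from by
              norm_num]
            rw [show dsN (j :: t) i =
                (i, j, ((1 + dsInner t (i + 1) (j - 1) : Nat) : Int)) ::
                  dsN (t.drop (dsInner t (i + 1) (j - 1)))
                    (i + 1 + (dsInner t (i + 1) (j - 1) : Int)) from by
              simp [dsN, hj]]
            simp
        · rw [if_neg hj, (ih t hlen').1 (i + 1) (acc ++ [(a, b, l)])]
          have hd : dsInner (j :: t) i (b - l) = 0 := by
            simp [dsInner]; intro h1 h2; omega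
          rw [hd]
          rw [show dsN ((j :: t).drop 0) (i + ((0 : Nat) : Int)) = dsN (j :: t) i from by
            norm_num]
          rw [show dsN (j :: t) i = dsN t (i + 1) from by simp [dsN, hj]]
          simp

-- ===== VERDICT (by name: the statement is the Claim_ definition above) =====
theorem decompose_stems_spec : Claim_equal_decompose_stems := by
  intro pairing _ _
  unfold Spec_decompose_stems decompose_stems decompose_stems_alt
  rw [dsOuterA_eq_dsN pairing.length pairing 0 PySem.Set.empty le_rfl
    (by intro p hp; simp [PySem.Set.empty] at hp)]
  rw [(altGo_eq_dsN pairing.length pairing le_rfl).1 0 []]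
  simp
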